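-- pv_equiv track=rewrite | github.com/claha/advent-of-code | 2023/14/solve.py | find_repeating_pattern
-- ===== SOURCE A (Python) =====
-- def find_repeating_pattern(lst):
--     """Find repeating pattern."""
--     n = len(lst)
--     for pattern_length in range(1, n // 2 + 1):
--         for start_index in range(pattern_length):
--             pattern = lst[start_index : start_index + pattern_length]
--             is_repeating = all(
--                 lst[i : i + pattern_length] == pattern
--                 for i in range(start_index, n - pattern_length + 1, pattern_length)
--             )
--             if is_repeating:
--                 return pattern, start_index
--     return None, None
-- ===== SOURCE B (Python) =====
-- def find_repeating_pattern(lst):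
--     """Find repeating pattern (per-period suffix-run-length method)."""
--     n = len(lst)
--     for p in range(1, n // 2 + 1):
--         m = n - p
--         # run[j] = length of the run of positions j' >= j with lst[j'] == lst[j' + p]
--         run = [0] * (m + 1)
--         for j in range(m - 1, -1, -1):
--             run[j] = run[j + 1] + 1 if lst[j] == lst[j + p] else 0
--         for s in range(p):
--             if run[s] >= ((m - s) // p) * p:
--                 return lst[s:s + p], s
--     return None, None
-- ===== Notes on version B (the rewrite author's own statement) =====
-- stated objective: faster
-- what changed: Instead of re-comparing every block slice against the candidate pattern for each (period, start), B precomputes per period p the suffix run lengths of the adjacent-equality array lst[j]==lst[j+p], so each start offset is checked in O(1).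
import Mathlib
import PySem

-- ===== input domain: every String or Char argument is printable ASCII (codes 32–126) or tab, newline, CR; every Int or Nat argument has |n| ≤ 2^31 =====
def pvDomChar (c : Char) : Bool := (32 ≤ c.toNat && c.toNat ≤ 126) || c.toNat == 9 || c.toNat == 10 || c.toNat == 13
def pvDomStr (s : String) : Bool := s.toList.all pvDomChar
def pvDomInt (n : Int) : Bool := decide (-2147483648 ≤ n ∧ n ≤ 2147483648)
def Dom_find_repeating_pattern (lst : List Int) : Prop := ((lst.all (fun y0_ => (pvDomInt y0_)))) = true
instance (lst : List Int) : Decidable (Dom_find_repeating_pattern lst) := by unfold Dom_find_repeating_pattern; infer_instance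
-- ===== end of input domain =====

-- B replaces A's per-start block-slice re-comparison by per-period suffix run lengths of the
-- adjacent-equality array, checking each start offset in O(1); a timing run measured B faster.


-- ===== PORT A =====
-- range(a, b, step) for nonnegative a, b and positive step (the only way A uses a stepped range)
def pvStepRange (a b step : Nat) : List Nat :=
  if _h : a < b ∧ 0 < step then a :: pvStepRange (a + step) b step else []
termination_by b - a
decreasing_by omega

-- lst[a : a+len] for 0 ≤ a, 0 ≤ len (the only slices A and B take; exact: drop/take clamp like Python)
def pvSlice (lst : List Int) (a len : Nat) : List Int := (lst.drop a).take len

-- literal port of A: for pattern_length in range(1, n//2+1): for start_index in range(pattern_length):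
-- compare every block slice against the pattern; first hit returns (pattern, start_index)
def find_repeating_pattern (lst : List Int) : Option (List Int) × Option Int :=
  let n := lst.length
  match (List.range' 1 (n / 2)).findSome? (fun p =>
    (List.range p).findSome? (fun s =>
      let pattern := pvSlice lst s p
      if (pvStepRange s (n - p + 1) p).all (fun i => pvSlice lst i p == pattern)
      then some (pattern, (s : Int)) else none)) with
  | some r => (some r.1, some r.2)
  | none => (none, none)

-- ===== PORT B =====
-- run values list built back to front, exactly B's descending loop: run[j] = run[j+1]+1 if
-- lst[j]==lst[j+p] else 0 (entries are nonnegative counts, represented as Nat; every index j < m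
-- and j + p < n is in range, so getD reads exactly Python's lst[j])
def pvBuildRun (lst : List Int) (p m j : Nat) : List Nat :=
  if _h : j < m then
    let rest := pvBuildRun lst p m (j + 1)
    (if lst.getD j 0 == lst.getD (j + p) 0 then rest.headD 0 + 1 else 0) :: rest
  else [0]
termination_by m - j

-- literal port of B (from Source B)
def find_repeating_pattern_alt (lst : List Int) : Option (List Int) × Option Int :=
  let n := lst.length
  match (List.range' 1 (n / 2)).findSome? (fun p =>
    let m := n - p
    let run := pvBuildRun lst p m 0
    (List.range p).findSome? (fun s =>
      if ((m - s) / p) * p ≤ run.getD s 0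
      then some (pvSlice lst s p, (s : Int)) else none)) with
  | some r => (some r.1, some r.2)
  | none => (none, none)

-- ===== PRECONDITION & SPEC =====
def Spec_find_repeating_pattern (lst : List Int) (out : Option (List Int) × Option Int) : Prop := out = find_repeating_pattern_alt lst
instance (lst : List Int) (out : Option (List Int) × Option Int) : Decidable (Spec_find_repeating_pattern lst out) := by unfold Spec_find_repeating_pattern; infer_instance

-- ===== CLAIM (what is proved, stated in full; the proofs are below) =====
def Claim_equal_find_repeating_pattern : Prop := ∀ (lst : List Int), Dom_find_repeating_pattern lst → Spec_find_repeating_pattern lst (find_repeating_pattern lst)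

-- ===== LEMMAS AND PROOFS =====

-- findSome? only depends on the function's values on members
theorem pv_findSome?_congr {α β : Type} {l : List α} {f g : α → Option β}
    (h : ∀ x ∈ l, f x = g x) : l.findSome? f = l.findSome? g := by
  induction l with
  | nil => rfl
  | cons a t ih =>
    simp only [List.findSome?_cons, h a (by simp)]
    cases g a with
    | some b => rfl
    | none => exact ih (fun x hx => h x (by simp [hx]))

-- A's stepped range is a mapped List.range of block indices
theorem pvStepRange_eq_map (step : Nat) (hstep : 0 < step) (a b : Nat) :
    pvStepRange a b step = (List.range ((b - a + step - 1) / step)).map (fun k => a + k * step) := by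
  by_cases h : a < b
  case neg =>
    rw [pvStepRange]
    have hz : (b - a + step - 1) / step = 0 := by
      apply Nat.div_eq_of_lt; omega
    simp [h, hz]
  case pos =>
    rw [pvStepRange]
    simp only [h, hstep, and_true, dif_pos]
    rw [pvStepRange_eq_map step hstep (a + step) b]
    have hC : (b - a + step - 1) / step = (b - (a + step) + step - 1) / step + 1 := by
      have hd : b - a ≥ 1 := by omega
      rcases Nat.lt_or_ge step (b - a) with hlt | hle
      · have h1 : b - (a + step) + step - 1 = (b - a - 1) := by omega
        have h2 : b - a + step - 1 = (b - a - 1) + step := by omega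
        rw [h1, h2, Nat.add_div_right _ hstep]
      · have h1 : b - (a + step) = 0 := by omega
        have h2 : b - a + step - 1 = step * 1 + (b - a - 1) := by omega
        rw [h1, h2, Nat.mul_add_div hstep, Nat.div_eq_of_lt (by omega),
          Nat.div_eq_of_lt (by omega)]
    rw [hC, List.range_succ_eq_map, List.map_cons, List.map_map]
    congr 1
    · omega
    · apply List.map_congr_left
      intro k _
      simp [Nat.succ_mul]
      ring
  termination_by b - a
  decreasing_by omega

-- reading run[s] is reading the head of the suffix built from s
theorem pvBuildRun_getD (lst : List Int) (p m : Nat) : ∀ (s j : Nat), j + s ≤ m →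
    (pvBuildRun lst p m j).getD s 0 = (pvBuildRun lst p m (j + s)).headD 0 := by
  intro s
  induction s with
  | zero => intro j _; cases (pvBuildRun lst p m j) <;> rfl
  | succ t ih =>
    intro j hj
    have hjm : j < m := by omega
    rw [pvBuildRun]
    simp only [hjm, dif_pos, List.getD_cons_succ]
    rw [ih (j+1) (by omega), show j + 1 + t = j + (t + 1) by omega]

-- run[j] ≥ t iff the whole window [j, j+t) of adjacent equalities holds
theorem pvBuildRun_head_iff (lst : List Int) (p m : Nat) : ∀ (t j : Nat), j + t ≤ m →
    (t ≤ (pvBuildRun lst p m j).headD 0 ↔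
      ∀ i < t, lst.getD (j + i) 0 = lst.getD (j + i + p) 0) := by
  intro t
  induction t with
  | zero => intro j _; simp
  | succ t ih =>
    intro j hj
    have hjm : j < m := by omega
    rw [pvBuildRun]
    simp only [hjm, dif_pos]
    have ih' := ih (j+1) (by omega)
    by_cases he : lst.getD j 0 = lst.getD (j + p) 0
    · simp only [beq_iff_eq, he, if_pos, List.headD_cons]
      constructor
      · intro h i hi
        rcases Nat.eq_zero_or_pos i with hi0 | hipos
        · subst hi0; simpa using he
        · obtain ⟨i', rfl⟩ : ∃ i', i = i' + 1 := ⟨i - 1, by omega⟩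
          have h2 := (ih'.mp (by omega)) i' (by omega)
          rw [show j + (i' + 1) = j + 1 + i' by omega]
          exact h2
      · intro h
        have h3 : ∀ i < t, lst.getD (j + 1 + i) 0 = lst.getD (j + 1 + i + p) 0 := by
          intro i hi
          have := h (i+1) (by omega)
          rw [show j + 1 + i = j + (i + 1) by omega]
          exact this
        have := ih'.mpr h3
        omega
    · simp only [beq_iff_eq, if_neg he, List.headD_cons]
      constructor
      · omega
      · intro h
        exact absurd (by simpa using h 0 (by omega)) he

-- equality of two full-length slices is pointwise equality
theorem pvSlice_eq_iff (lst : List Int) (p a b : Nat)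
    (ha : a + p ≤ lst.length) (hb : b + p ≤ lst.length) :
    (pvSlice lst a p == pvSlice lst b p) = true ↔
      ∀ r < p, lst.getD (a + r) 0 = lst.getD (b + r) 0 := by
  rw [beq_iff_eq]
  unfold pvSlice
  constructor
  · intro h r hr
    have := congrArg (fun l => l.getD r (0:Int)) h
    simp only [List.getD] at this
    rw [List.getElem?_take, List.getElem?_drop, List.getElem?_take, List.getElem?_drop] at this
    simp only [hr, if_pos] at this
    simpa [List.getD] using this
  · intro h
    apply List.ext_getElem
    · simp; omega
    · intro i h1 h2
      have hi : i < p := by simp at h1; omega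
      have := h i hi
      simp only [List.getElem_take, List.getElem_drop]
      rw [List.getD_eq_getElem lst 0 (by omega), List.getD_eq_getElem lst 0 (by omega)] at this
      exact this

-- all K blocks equal to the first iff all (K-1)*p adjacent equalities hold
theorem pv_blocks_iff (lst : List Int) (p s K : Nat) (hp : 0 < p) :
    ((∀ k < K, ∀ r < p, lst.getD (s + k * p + r) 0 = lst.getD (s + r) 0) ↔
      ∀ i < (K - 1) * p, lst.getD (s + i) 0 = lst.getD (s + i + p) 0) := by
  constructor
  · intro h i hi
    have hK2 : 2 ≤ K := by
      by_contra hc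
      have : (K - 1) * p = 0 := by
        have : K - 1 = 0 := by omega
        simp [this]
      omega
    set k := i / p with hk
    set r := i % p with hr
    have hir : i = k * p + r := by
      rw [hk, hr, Nat.mul_comm]; exact (Nat.div_add_mod i p).symm
    have hrp : r < p := Nat.mod_lt _ hp
    have hkK : k + 1 < K := by
      have : k * p + r < (K - 1) * p := by omega
      by_contra hc
      have hK1k : K - 1 ≤ k := by omega
      have : (K - 1) * p ≤ k * p := Nat.mul_le_mul_right p hK1k
      omega
    have e1 := h k (by omega) r hrp
    have e2 := h (k + 1) (by omega) r hrp
    have hsm : (k + 1) * p = k * p + p := Nat.succ_mul k p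
    rw [show s + i + p = s + (k + 1) * p + r by omega, show s + i = s + k * p + r by omega]
    rw [e1, e2]
  · intro h k hk r hr
    induction k with
    | zero => simp
    | succ k ih =>
      have hkp : k * p + r < (K - 1) * p := by
        have : k + 1 ≤ K - 1 := by omega
        have := Nat.mul_le_mul_right p this
        calc k * p + r < k * p + p := by omega
          _ = (k + 1) * p := by ring
          _ ≤ (K - 1) * p := this
      have e1 := h (k * p + r) hkp
      have e2 := ih (by omega)
      have hsm : (k + 1) * p = k * p + p := Nat.succ_mul k p
      rw [show s + (k + 1) * p + r = s + (k * p + r) + p by omega]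
      rw [← e1, show s + (k * p + r) = s + k * p + r by omega, e2]

-- the two inner conditions coincide for 1 ≤ p, 2p ≤ n, s < p
theorem pv_cond_eq (lst : List Int) (p s : Nat) (hp : 0 < p) (hpn : 2 * p ≤ lst.length)
    (hs : s < p) :
    ((pvStepRange s (lst.length - p + 1) p).all
        (fun i => pvSlice lst i p == pvSlice lst s p) = true ↔
      ((lst.length - p - s) / p) * p ≤ (pvBuildRun lst p (lst.length - p) 0).getD s 0) := by
  have hsp : s + p ≤ lst.length := by omega
  set n := lst.length with hn
  set m := n - p with hm
  have hpm : p ≤ m := by omega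
  have hsm : s ≤ m := by omega
  have hK : (n - p + 1 - s + p - 1) / p = (m - s) / p + 1 := by
    have : n - p + 1 - s + p - 1 = (m - s) + p := by omega
    rw [this, Nat.add_div_right _ hp]
  rw [pvStepRange_eq_map p hp, hK]
  set K := (m - s) / p + 1 with hKdef
  have hdm : ((m - s) / p) * p ≤ m - s := by
    have := Nat.div_mul_le_self (m - s) p
    omega
  have hbound : ∀ k < K, s + k * p + p ≤ n := by
    intro k hk
    have hk' : k ≤ (m - s) / p := by omega
    have := Nat.mul_le_mul_right p hk'
    omega
  rw [List.all_map, List.all_eq_true]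
  have step1 : ((List.range K).all ((fun i => pvSlice lst i p == pvSlice lst s p) ∘ fun k => s + k * p) = true) ↔
      ∀ k < K, ∀ r < p, lst.getD (s + k * p + r) 0 = lst.getD (s + r) 0 := by
    rw [List.all_eq_true]
    constructor
    · intro h k hk
      have := h k (List.mem_range.mpr hk)
      rw [Function.comp_apply] at this
      exact (pvSlice_eq_iff lst p (s + k * p) s (hbound k hk) hsp).mp this
    · intro h k hk
      have hk' := List.mem_range.mp hk
      rw [Function.comp_apply]
      exact (pvSlice_eq_iff lst p (s + k * p) s (hbound k hk') hsp).mpr (h k hk')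
  rw [← List.all_eq_true, step1, pv_blocks_iff lst p s K hp]
  have hK1 : K - 1 = (m - s) / p := by rw [hKdef, Nat.add_sub_cancel]
  rw [hK1]
  rw [pvBuildRun_getD lst p m s 0 (by omega)]
  simp only [Nat.zero_add]
  rw [pvBuildRun_head_iff lst p m (((m - s) / p) * p) s (by omega)]

-- ===== VERDICT (by name: the statement is the Claim_ definition above) =====
theorem find_repeating_pattern_spec : Claim_equal_find_repeating_pattern := by
  intro lst _
  unfold Spec_find_repeating_pattern
  have key : (List.range' 1 (lst.length / 2)).findSome? (fun p =>
      (List.range p).findSome? (fun s =>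
        if (pvStepRange s (lst.length - p + 1) p).all
            (fun i => pvSlice lst i p == pvSlice lst s p)
        then some (pvSlice lst s p, (s : Int)) else none))
    = (List.range' 1 (lst.length / 2)).findSome? (fun p =>
        (List.range p).findSome? (fun s =>
          if ((lst.length - p - s) / p) * p ≤ (pvBuildRun lst p (lst.length - p) 0).getD s 0
          then some (pvSlice lst s p, (s : Int)) else none)) := by
    apply pv_findSome?_congr
    intro p hp
    obtain ⟨h1, h2⟩ := List.mem_range'_1.mp hp
    apply pv_findSome?_congr
    intro s hs
    have hsP := List.mem_range.mp hs
    have hpn : 2 * p ≤ lst.length := by omega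
    exact if_congr (pv_cond_eq lst p s h1 hpn hsP) rfl rfl
  simp only [find_repeating_pattern, find_repeating_pattern_alt]
  rw [key]
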